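-- pv_equiv track=rewrite | github.com/broken-byte/HR_test_environment_with_solutions | greedy_algorithms/advanced_problems/reverse_shuffle_merge/reverse_shuffle_merge.py | brute_force_reverse_shuffle_merge
-- ===== SOURCE A (Python) =====
-- from itertools import permutations
-- from collections import Counter
--
-- def brute_force_reverse_shuffle_merge(s: str) -> str:
--     # Get char counts of s
--     s_counts: dict = Counter(s)
--     # Get char counts that must be in A
--     a_counts = {
--         char: int(count / 2) for char, count in s_counts.items()
--     }
--     # convert a_counts into a string
--     a_counts_as_string: str = ""
--     for char, count in a_counts.items():
--         for _ in range(count):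
--             a_counts_as_string += char
--
--     # get all permutations of a_counts_as_string
--     permutations_of_a: list = list(permutations(a_counts_as_string, len(a_counts_as_string)))
--     string_permutations_of_a: list = ["".join(permutation) for permutation in permutations_of_a]
--     # Get the minimum
--     lexigraphically_smallest_a: str = min(string_permutations_of_a)
--     return lexigraphically_smallest_a
-- ===== SOURCE B (Python) =====
-- from collections import Counter
--
-- def brute_force_reverse_shuffle_merge(s: str) -> str:
--     # Direct construction: half of each character's count, in ascending character order.
--     counts = Counter(s)
--     return "".join(c * (counts[c] // 2) for c in sorted(counts))
-- ===== Notes on version B (the rewrite author's own statement) =====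
-- stated objective: faster
-- what changed: B builds the answer directly from a character count table (count//2 copies of each distinct character in ascending order) instead of materializing all n! permutations of the half-multiset string and taking their minimum.
import Mathlib
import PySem

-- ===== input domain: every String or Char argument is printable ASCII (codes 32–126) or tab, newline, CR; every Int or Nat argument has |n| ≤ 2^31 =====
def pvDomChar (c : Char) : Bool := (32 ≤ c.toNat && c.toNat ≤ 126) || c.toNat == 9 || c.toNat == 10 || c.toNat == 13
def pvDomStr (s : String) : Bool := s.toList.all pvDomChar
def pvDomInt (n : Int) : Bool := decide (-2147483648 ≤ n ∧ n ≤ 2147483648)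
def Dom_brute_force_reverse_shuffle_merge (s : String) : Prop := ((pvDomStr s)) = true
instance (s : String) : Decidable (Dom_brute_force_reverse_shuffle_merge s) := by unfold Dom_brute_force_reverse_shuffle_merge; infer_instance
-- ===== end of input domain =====

-- B replaces A's enumerate-all-permutations-and-take-the-min with a direct construction from the
-- character count table (count//2 copies of each distinct character, ascending); objective: faster.

-- ===== PORT A =====
-- "".join(permutation) where permutation is a tuple of single characters
def pvJoinChars (p : List Char) : String :=
  PySem.Str.join "" (p.map (fun c => String.ofList [c]))

def brute_force_reverse_shuffle_merge (s : String) : String :=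
  let s_counts : PySem.Dict Char Int := PySem.Dict.counter s.toList
  -- int(count / 2): the counts are small positive ints, so float division + int() is exact floor
  -- division; the comprehension's keys (the Counter's keys) are distinct, so the dict is this pair list
  let a_counts : List (Char × Int) :=
    s_counts.items.map (fun p => (p.1, PySem.Int.floordiv p.2 2))
  let a_counts_as_string : List Char :=
    a_counts.foldl (fun acc p =>
      (PySem.List.pyRange 0 p.2).foldl (fun acc2 _ => acc2 ++ [p.1]) acc) []
  let permutations_of_a : List (List Char) :=
    PySem.List.permutations a_counts_as_string a_counts_as_string.length
  let string_permutations_of_a : List String := permutations_of_a.map pvJoinChars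
  -- Python's min raises only on an empty list; permutations always yields at least one tuple,
  -- so string_permutations_of_a is never empty and the default "" is unreachable
  (PySem.List.min? string_permutations_of_a (fun x => x)).getD ""

-- ===== PORT B =====
def brute_force_reverse_shuffle_merge_alt (s : String) : String :=
  let counts : PySem.Dict Char Int := PySem.Dict.counter s.toList
  PySem.Str.join ""
    ((PySem.List.sorted counts.keys (fun c => c)).map
      (fun c => String.ofList (PySem.List.pyRepeat [c] (PySem.Int.floordiv (counts.getD c 0) 2))))

-- ===== PRECONDITION & SPEC =====
def Spec_brute_force_reverse_shuffle_merge (s : String) (out : String) : Prop := out = brute_force_reverse_shuffle_merge_alt s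
instance (s : String) (out : String) : Decidable (Spec_brute_force_reverse_shuffle_merge s out) := by unfold Spec_brute_force_reverse_shuffle_merge; infer_instance

-- ===== CLAIM (what is proved, stated in full; the proofs are below) =====
def Claim_equal_brute_force_reverse_shuffle_merge : Prop := ∀ (s : String), Dom_brute_force_reverse_shuffle_merge s → Spec_brute_force_reverse_shuffle_merge s (brute_force_reverse_shuffle_merge s)

-- ===== LEMMAS AND PROOFS =====

-- the half-count multiset of l: count//2 copies of each distinct character, first-occurrence order
def pvHalf (l : List Char) : List Char :=
  (PySem.Set.ofList l).flatMap (fun k => List.replicate (l.count k / 2) k)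

lemma pv_join_nil_flatten : ∀ (parts : List (List Char)), PySem.Chars.join [] parts = parts.flatten
  | [] => PySem.Chars.join_nil []
  | [a] => by simp [PySem.Chars.join_singleton]
  | a :: b :: rest => by
      rw [PySem.Chars.join_cons_cons, pv_join_nil_flatten (b :: rest)]; simp

lemma pv_half_cast (m : Nat) : PySem.Int.floordiv (m : Int) 2 = ((m / 2 : Nat) : Int) := by
  exact_mod_cast PySem.Int.floordiv_natCast m 2

lemma pv_joinChars_toList (p : List Char) : (pvJoinChars p).toList = p := by
  simp only [pvJoinChars, PySem.Str.toList_join, List.map_map, Function.comp_def]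
  rw [show ("" : String).toList = [] from rfl, pv_join_nil_flatten, ← List.flatMap_def]
  simp

lemma pv_A_chars (l : List Char) :
    ((PySem.Dict.counter l).items.map (fun p => (p.1, PySem.Int.floordiv p.2 2))).foldl
        (fun acc p => (PySem.List.pyRange 0 p.2).foldl (fun acc2 _ => acc2 ++ [p.1]) acc) []
      = pvHalf l := by
  rw [PySem.Dict.items_counter]
  simp only [List.map_map, Function.comp_def, pv_half_cast, List.foldl_map,
    PySem.List.pyRange_zero_natCast, PySem.List.foldl_append_singleton_eq_map,
    List.map_const', List.length_map, List.length_range]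
  rw [PySem.List.foldl_append_eq_flatMap (g := fun k => List.replicate (l.count k / 2) k)]
  simp [pvHalf]

lemma pv_mem_perms : ∀ (p xs : List Char), p.Perm xs → p ∈ PySem.List.permutations xs xs.length
  | [], xs, h => by
      have hx : xs = [] := h.symm.eq_nil
      subst hx
      simp [PySem.List.permutations_zero]
  | a :: p', xs, h => by
      have ha : a ∈ xs := h.subset List.mem_cons_self
      have hi : xs.idxOf a < xs.length := List.idxOf_lt_length_of_mem ha
      have hget : xs[xs.idxOf a]? = some a := List.getElem?_idxOf ha
      have hperm' : p'.Perm (xs.eraseIdx (xs.idxOf a)) := by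
        have h2 := (List.cons_perm_iff_perm_erase.mp h).2
        rwa [List.erase_eq_eraseIdx_of_idxOf rfl] at h2
      have hlen : xs.length = p'.length + 1 := by simpa using h.length_eq.symm
      have hlen2 : (xs.eraseIdx (xs.idxOf a)).length = p'.length := by
        rw [List.length_eraseIdx]; simp [hi]; omega
      have IH : p' ∈ PySem.List.permutations (xs.eraseIdx (xs.idxOf a)) p'.length :=
        hlen2 ▸ pv_mem_perms p' (xs.eraseIdx (xs.idxOf a)) hperm'
      rw [hlen, PySem.List.permutations.eq_2]
      refine List.mem_flatMap.mpr ⟨xs.idxOf a, List.mem_range.mpr hi, ?_⟩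
      rw [hget]
      exact List.mem_map_of_mem IH
  termination_by p _ _ => p.length

lemma pv_nil_le' (p : List Char) : ([] : List Char) ≤ p := by
  rcases p with _ | ⟨b, q⟩
  · exact le_refl _
  · exact le_of_lt (List.nil_lt_cons b q)

lemma pv_cons_lt_cons (a b : Char) (t q : List Char) (h : a < b) : a :: t < b :: q :=
  List.cons_lt_cons_iff.mpr (Or.inl h)

lemma pv_sorted_le_of_perm : ∀ (l p : List Char), l.Pairwise (· ≤ ·) → l.Perm p → l ≤ p
  | [], p, _, _ => pv_nil_le' p
  | a :: t, p, hs, hp => by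
      rcases p with _ | ⟨b, q⟩
      · exact absurd hp.eq_nil (by simp)
      · have hb : b ∈ a :: t := hp.symm.subset List.mem_cons_self
        have hab : a ≤ b := by
          rcases List.mem_cons.mp hb with rfl | hbt
          · exact le_refl _
          · exact (List.pairwise_cons.mp hs).1 b hbt
        rcases eq_or_lt_of_le hab with rfl | hlt
        · exact List.cons_le_cons a
            (pv_sorted_le_of_perm t q (List.pairwise_cons.mp hs).2 hp.cons_inv)
        · exact le_of_lt (pv_cons_lt_cons a b t q hlt)
  termination_by l _ _ _ => l.length

lemma pv_pairwise_flatMap (ks : List Char) (n : Char → Nat) (h : ks.Pairwise (· ≤ ·)) :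
    (ks.flatMap (fun k => List.replicate (n k) k)).Pairwise (· ≤ ·) := by
  induction ks with
  | nil => simp
  | cons k ks ih =>
    rw [List.flatMap_cons, List.pairwise_append]
    obtain ⟨hk, hks⟩ := List.pairwise_cons.mp h
    refine ⟨?_, ih hks, ?_⟩
    · rw [List.pairwise_replicate]; right; exact le_refl k
    · intro x hx y hy
      obtain ⟨k', hk', hy'⟩ := List.mem_flatMap.mp hy
      rw [List.eq_of_mem_replicate hx, List.eq_of_mem_replicate hy']
      exact hk k' hk'

lemma pv_B_toList (s : String) :
    (brute_force_reverse_shuffle_merge_alt s).toList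
      = (PySem.List.sorted (PySem.Set.ofList s.toList) (fun c => c)).flatMap
          (fun k => List.replicate (s.toList.count k / 2) k) := by
  simp only [brute_force_reverse_shuffle_merge_alt, PySem.Dict.keys_counter,
    PySem.Dict.getD_counter, PySem.Str.toList_join, List.map_map, Function.comp_def,
    pv_half_cast, PySem.List.pyRepeat_singleton, Int.toNat_natCast]
  rw [show ("" : String).toList = [] from rfl, pv_join_nil_flatten, ← List.flatMap_def]
  simp

lemma pv_msort_eq (l : List Char) :
    PySem.List.sorted (pvHalf l) (fun c => c)
      = (PySem.List.sorted (PySem.Set.ofList l) (fun c => c)).flatMap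
          (fun k => List.replicate (l.count k / 2) k) := by
  apply PySem.List.eq_of_perm_of_pairwise_le_of_injective (fun c : Char => c) Function.injective_id
  · exact (PySem.List.sorted_perm _ _ _).trans
      (List.Perm.flatMap_right _ (PySem.List.sorted_perm _ _ _)).symm
  · simpa using PySem.List.sorted_pairwise (pvHalf l) (fun c : Char => c)
  · have := pv_pairwise_flatMap (PySem.List.sorted (PySem.Set.ofList l) (fun c => c))
      (fun k => l.count k / 2) (by simpa using PySem.List.sorted_pairwise (PySem.Set.ofList l) (fun c : Char => c))
    simpa using this


-- ===== VERDICT (by name: the statement is the Claim_ definition above) =====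
theorem brute_force_reverse_shuffle_merge_spec : Claim_equal_brute_force_reverse_shuffle_merge := by
  intro s _
  unfold Spec_brute_force_reverse_shuffle_merge
  have hA : brute_force_reverse_shuffle_merge s
      = (PySem.List.min? ((PySem.List.permutations (pvHalf s.toList) (pvHalf s.toList).length).map pvJoinChars) (fun x => x)).getD "" := by
    simp only [brute_force_reverse_shuffle_merge, pv_A_chars]
  set L := pvHalf s.toList with hL
  set ms := PySem.List.sorted L (fun c : Char => c) with hms
  have hmsp : ms.Perm L := PySem.List.sorted_perm _ _ _
  have hmem : ms ∈ PySem.List.permutations L L.length := pv_mem_perms ms L hmsp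
  have hmemS : pvJoinChars ms ∈ (PySem.List.permutations L L.length).map pvJoinChars :=
    List.mem_map_of_mem hmem
  rcases hmin : PySem.List.min? ((PySem.List.permutations L L.length).map pvJoinChars) (fun x => x) with _ | m
  · rw [(PySem.List.min?_eq_none_iff _ _).mp hmin] at hmemS
    exact absurd hmemS (by simp)
  · obtain ⟨q, hq, hmq⟩ := List.mem_map.mp (PySem.List.min?_mem hmin)
    have hqperm : q.Perm L := PySem.List.perm_of_mem_permutations hq
    have h1 : m ≤ pvJoinChars ms := PySem.List.min?_isMin hmin _ hmemS
    have h2 : pvJoinChars ms ≤ m := by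
      rw [← hmq, String.le_iff_toList_le, pv_joinChars_toList, pv_joinChars_toList]
      exact pv_sorted_le_of_perm ms q
        (by simpa using PySem.List.sorted_pairwise L (fun c : Char => c))
        (hmsp.trans hqperm.symm)
    have hm : m = pvJoinChars ms := le_antisymm h1 h2
    have hB : brute_force_reverse_shuffle_merge_alt s = pvJoinChars ms := by
      apply String.toList_inj.mp
      rw [pv_joinChars_toList, pv_B_toList, hms, hL, pv_msort_eq]
    rw [hA, hmin, Option.getD_some, hm, hB]
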